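-- pv_equiv track=rewrite | github.com/enicode/Coding_Python | 2nd/불량사용자.py | subsolution
-- ===== SOURCE A (Python) =====
-- import copy
--
-- def subsolution(matchList):
--     # 가능한 유저리스트를 담는 리스트
--     nlist = []
--     # 만약 하나의 리스트만 들어오면 뽑을수있는 모든 경우의 수를 각각 담은 리스트를 반환한다.
--     if len(matchList) == 1:
--         for mlist in matchList:
--             for el in mlist[1]:
--                 nlist.append([el])
--         return nlist
--     # 첫 그룹 아이디중 하나를 다른 곳에선 있다면 삭제
--     # 이것을 모든 그룹내 아이디에서 반복
--     for i in range(len(matchList[0][1])):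
--         # 재귀함수에 넣어줄 새로운 매치리스트
--         newMatchList = copy.deepcopy(matchList)
--         # 이제 첫그룹을 제외한 모든 그룹에서
--         for k in range(1,len(matchList)):
--             # 선택한 아이디와 같은 아이디가 발견되면 삭제한다.
--             if matchList[0][1][i] in newMatchList[k][1]:
--                 newMatchList[k][1].remove(matchList[0][1][i])
--         #위 과정을 첫 그룹을 제외하고 반복한다.
--         tmp2 = subsolution(newMatchList[1:])
--         # 그렇게 해서 구한 리스트들에 대해서
--         for e in tmp2:
--             # 아까 뽑은 아이디를
--             tmp = [matchList[0][1][i]]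
--             # 리스트에넣는다.(1차원배열)
--             tmp.extend(e)
--             # 그리고 반환할 리스트에 추가한다.(2차원배열)
--             nlist.append(tmp)
--     # 그렇게 만든 리스트를 반환한다.
--     return nlist
-- ===== SOURCE B (Python) =====
-- def subsolution(matchList):
--     partials = [[]]
--     for _, ids in matchList:
--         new = []
--         for combo in partials:
--             avail = list(ids)
--             for used in combo:
--                 if used in avail:
--                     avail.remove(used)
--             for el in avail:
--                 new.append(combo + [el])
--         partials = new
--     return partials
-- ===== Notes on version B (the rewrite author's own statement) =====
-- stated objective: simpler
-- what changed: Replaces the recursive enumeration with deepcopy-and-remove of later groups by a single iterative left-to-right fold that extends partial combos, recomputing each group's available ids from the combo built so far (one list.remove per used id).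
-- outside the precondition, e.g. on subsolution([]): A raises IndexError, B returns [[]]
-- crash fix: On the empty list A raises IndexError (it indexes matchList[0]); B naturally returns [[]] (the one empty combination). — e.g. on subsolution([]): A raises IndexError, B returns [[]]
import Mathlib
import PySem

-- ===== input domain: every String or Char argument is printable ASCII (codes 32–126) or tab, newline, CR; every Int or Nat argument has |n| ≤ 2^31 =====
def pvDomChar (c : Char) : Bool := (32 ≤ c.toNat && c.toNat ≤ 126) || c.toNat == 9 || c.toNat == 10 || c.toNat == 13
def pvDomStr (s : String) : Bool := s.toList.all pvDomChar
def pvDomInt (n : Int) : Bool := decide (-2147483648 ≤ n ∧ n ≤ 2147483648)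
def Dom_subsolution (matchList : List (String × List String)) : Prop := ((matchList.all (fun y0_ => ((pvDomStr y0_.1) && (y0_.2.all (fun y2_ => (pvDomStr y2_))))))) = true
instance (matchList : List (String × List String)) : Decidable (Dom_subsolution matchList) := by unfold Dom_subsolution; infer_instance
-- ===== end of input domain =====

-- B rewrites A's recursion (deepcopy + remove from later groups, recurse on the tail) as one
-- iterative fold extending partial combos group by group; same return value on nonempty input.

-- `if x in l: l.remove(x)` — remove the first occurrence of x if present (shared snippet of both Pythons)
def rmIf (x : String) (l : List String) : List String := if l.contains x then l.erase x else l

-- ===== PORT A =====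
def subsolution (matchList : List (String × List String)) : List (List String) :=
  match matchList with
  | [] => []        -- Python raises IndexError here (matchList[0]); excluded by Pre_
  | [g] => g.2.map (fun el => [el])                    -- the len == 1 base case
  | g :: h :: t =>
      -- for i in range(len(matchList[0][1])): remove the chosen id from every later group, recurse on the tail
      g.2.foldl (fun nlist x =>
        nlist ++ (subsolution ((h :: t).map (fun p => (p.1, rmIf x p.2)))).map (fun e => x :: e)) []
termination_by matchList.length
decreasing_by simp

-- ===== PORT B =====
-- avail = list(ids) with one occurrence removed (if present) for each id already in combo
def avail (ids : List String) (combo : List String) : List String :=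
  combo.foldl (fun av used => rmIf used av) ids

def subsolution_alt (matchList : List (String × List String)) : List (List String) :=
  matchList.foldl (fun partials g =>
    partials.foldl (fun acc combo =>
      acc ++ (avail g.2 combo).map (fun el => combo ++ [el])) []) [[]]

-- ===== PRECONDITION & SPEC =====
-- Pre_ excludes only the empty list, on which Python A raises IndexError.
def Pre_subsolution (matchList : List (String × List String)) : Prop := matchList ≠ []
instance (matchList : List (String × List String)) : Decidable (Pre_subsolution matchList) := by unfold Pre_subsolution; infer_instance
def pvWitness_subsolution : (List (String × List String)) := [("A", ["a", "b"]), ("B", ["b"])]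

-- On the empty list A raises IndexError (it indexes matchList[0]); B returns [[]].
def Raises_subsolution (matchList : List (String × List String)) : Prop := matchList = []
instance (matchList : List (String × List String)) : Decidable (Raises_subsolution matchList) := by unfold Raises_subsolution; infer_instance
def pvRaiseWitness_subsolution : (List (String × List String)) := []
def pvRaiseWitnessOut_subsolution : List (List String) := [[]]

def Spec_subsolution (matchList : List (String × List String)) (out : List (List String)) : Prop := out = subsolution_alt matchList
instance (matchList : List (String × List String)) (out : List (List String)) : Decidable (Spec_subsolution matchList out) := by unfold Spec_subsolution; infer_instance

-- ===== CLAIM (what is proved, stated in full; the proofs are below) =====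
def Claim_equal_subsolution : Prop := ∀ (matchList : List (String × List String)), Dom_subsolution matchList → Pre_subsolution matchList → Spec_subsolution matchList (subsolution matchList)
def Claim_raises_subsolution : Prop := (∀ (matchList : List (String × List String)), Dom_subsolution matchList → Raises_subsolution matchList → ¬ Pre_subsolution matchList) ∧ (Dom_subsolution (pvRaiseWitness_subsolution) ∧ Raises_subsolution (pvRaiseWitness_subsolution) ∧ subsolution_alt (pvRaiseWitness_subsolution) = pvRaiseWitnessOut_subsolution)

-- ===== LEMMAS AND PROOFS =====

-- one step of B: extend every partial combo with every still-available id of group g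
def stepB (g : String × List String) (ps : List (List String)) : List (List String) :=
  ps.foldl (fun acc combo => acc ++ (avail g.2 combo).map (fun el => combo ++ [el])) []

-- B's whole fold, seeded with ps
def fgB (gs : List (String × List String)) (ps : List (List String)) : List (List String) :=
  gs.foldl (fun partials g => stepB g partials) ps

theorem foldl_append_flatMap {α β : Type} (f : α → List β) (ps : List α) (acc : List β) :
    ps.foldl (fun a c => a ++ f c) acc = acc ++ ps.flatMap f := by
  induction ps generalizing acc with
  | nil => simp
  | cons p ps ih => simp [List.foldl, ih]

theorem stepB_eq (g : String × List String) (ps : List (List String)) :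
    stepB g ps = ps.flatMap (fun combo => (avail g.2 combo).map (fun el => combo ++ [el])) := by
  simpa [stepB] using foldl_append_flatMap (fun combo => (avail g.2 combo).map (fun el => combo ++ [el])) ps []

theorem fgB_append (gs : List (String × List String)) (ps qs : List (List String)) :
    fgB gs (ps ++ qs) = fgB gs ps ++ fgB gs qs := by
  induction gs generalizing ps qs with
  | nil => simp [fgB]
  | cons g gs ih =>
      simp only [fgB, List.foldl] at *
      rw [stepB_eq, List.flatMap_append, ← stepB_eq, ← stepB_eq, ih]

theorem fgB_flatMap (gs : List (String × List String)) (ps : List (List String)) :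
    fgB gs ps = ps.flatMap (fun p => fgB gs [p]) := by
  induction ps with
  | nil => simp [fgB]; induction gs with
            | nil => rfl
            | cons g gs ih => simpa [fgB, List.foldl, stepB] using ih
  | cons p ps ih =>
      have : p :: ps = [p] ++ ps := rfl
      rw [this, fgB_append, ih]; simp

theorem avail_snoc (ids c : List String) (x : String) :
    avail ids (c ++ [x]) = rmIf x (avail ids c) := by
  simp [avail, List.foldl_append]

-- main invariant: running A on the groups with the ids already used in c removed,
-- prefixed by c, equals B's fold over those groups seeded with the single partial c
theorem mainL (gs : List (String × List String)) :
    ∀ c : List String, gs ≠ [] →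
      (subsolution (gs.map (fun p => (p.1, avail p.2 c)))).map (fun e => c ++ e) = fgB gs [c] := by
  induction gs with
  | nil => intro c h; exact absurd rfl h
  | cons g rest ih =>
      intro c _
      cases rest with
      | nil =>
          simp [subsolution, fgB, List.foldl, stepB_eq, List.map_map, Function.comp]
      | cons h t =>
          have unf : subsolution ((g :: h :: t).map (fun p => (p.1, avail p.2 c)))
              = (avail g.2 c).foldl (fun nlist x =>
                  nlist ++ (subsolution (((h :: t).map (fun p => (p.1, avail p.2 c))).map
                      (fun p => (p.1, rmIf x p.2)))).map (fun e => x :: e)) [] := by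
            simp [subsolution]
          rw [unf, foldl_append_flatMap, List.nil_append, List.map_flatMap]
          have inner : ∀ x : String,
              ((subsolution (((h :: t).map (fun p => (p.1, avail p.2 c))).map
                  (fun p => (p.1, rmIf x p.2)))).map (fun e => x :: e)).map (fun e => c ++ e)
              = fgB (h :: t) [c ++ [x]] := by
            intro x
            have rw1 : ((h :: t).map (fun p => (p.1, avail p.2 c))).map (fun p => (p.1, rmIf x p.2))
                = (h :: t).map (fun p => (p.1, avail p.2 (c ++ [x]))) := by
              simp [List.map_map, Function.comp, avail_snoc]
            rw [rw1, List.map_map]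
            have rw2 : ((fun e => c ++ e) ∘ (fun e => x :: e)) = fun e => (c ++ [x]) ++ e := by
              funext e; simp
            rw [rw2, ih (c ++ [x]) (by simp)]
          calc ((avail g.2 c).flatMap fun x =>
                  ((subsolution (((h :: t).map (fun p => (p.1, avail p.2 c))).map
                      (fun p => (p.1, rmIf x p.2)))).map (fun e => x :: e)).map (fun e => c ++ e))
              = (avail g.2 c).flatMap (fun x => fgB (h :: t) [c ++ [x]]) := by
                  exact List.flatMap_congr (fun x _ => inner x)
            _ = fgB (g :: h :: t) [c] := by
                  show _ = fgB (h :: t) (stepB g [c])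
                  rw [stepB_eq]
                  simp only [List.flatMap_singleton]
                  rw [fgB_flatMap (h :: t)]
                  simp [List.flatMap_map]

-- ===== VERDICT (by name: the statement is the Claim_ definition above) =====
theorem subsolution_spec : Claim_equal_subsolution := by
  intro ml _ hpre
  unfold Spec_subsolution
  have h := mainL ml [] hpre
  have : ml.map (fun p => (p.1, avail p.2 [])) = ml := by
    simp [avail]
  rw [this] at h
  simp only [List.nil_append, List.map_id'] at h
  rw [h]; rfl

@[simp] theorem subsolution_raises : Claim_raises_subsolution := by
  unfold Claim_raises_subsolution
  exact ⟨fun ml _ hr => by simp [Pre_subsolution, Raises_subsolution] at *; exact hr, by decide⟩
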